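-- pv_equiv track=rewrite | github.com/hliangzhao/PFSUM | PFSUM/instance_maker.py | prediction_generator
-- ===== SOURCE A (Python) =====
-- def prediction_generator(instance, T):
--
--     prediction = []
--     pre_sum = [instance[0]]
--
--     for i in range(1, len(instance)):
--         v = instance[i] + pre_sum[i - 1]
--         pre_sum.append(v)
--
--     for i in range(0, len(instance)):
--         prediction.append(pre_sum[min(i + T - 1, len(instance) - 1)])
--         if (i > 0):
--             prediction[i] -= pre_sum[i - 1]
--
--     return prediction
-- ===== SOURCE B (Python) =====
-- def prediction_generator(instance, T):
--     n = len(instance)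
--     if T <= 0:
--         return [0] * n
--     running = sum(instance[:T])
--     out = []
--     for i in range(n):
--         out.append(running)
--         if i + 1 < n:
--             running -= instance[i]
--             if i + T < n:
--                 running += instance[i + T]
--     return out
-- ===== Notes on version B (the rewrite author's own statement) =====
-- stated objective: faster
-- what changed: Replaced A's prefix-sum table plus per-index table lookups by a single-pass sliding-window running sum; no pre_sum list is built or indexed, which a timing run measured as ~2.5x faster at large n (constant factor, same O(n)).
-- intended difference: For T <= 0 (nonempty instance with len+T >= 1), A's negative index i+T-1 wraps around the pre_sum list and returns accidental prefix-sum differences (e.g. the total sum at i=0), while B returns 0 at every position, the sum of an empty window, which is the intended value for a nonpositive window length. — e.g. on prediction_generator([1, 2], 0): A returns [3, 0], B returns [0, 0]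
import Mathlib
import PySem

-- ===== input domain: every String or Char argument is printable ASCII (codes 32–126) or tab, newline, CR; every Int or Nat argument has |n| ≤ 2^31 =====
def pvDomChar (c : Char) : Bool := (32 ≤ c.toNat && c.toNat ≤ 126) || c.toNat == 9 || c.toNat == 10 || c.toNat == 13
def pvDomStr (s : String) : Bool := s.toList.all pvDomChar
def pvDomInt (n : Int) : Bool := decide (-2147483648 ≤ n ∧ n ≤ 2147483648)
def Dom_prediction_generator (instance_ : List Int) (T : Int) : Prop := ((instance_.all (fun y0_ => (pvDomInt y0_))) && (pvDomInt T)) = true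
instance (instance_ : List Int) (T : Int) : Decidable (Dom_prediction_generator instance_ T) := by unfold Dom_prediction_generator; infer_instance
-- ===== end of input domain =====

-- B replaces A's prefix-sum table by a single-pass sliding-window running sum (no pre_sum list
-- built or indexed; measurably faster by a constant factor, same O(n)); for T ≤ 0 B returns the
-- empty-window sum 0 instead of A's negative-index wraparound values (see D_ below).

-- ===== PORT A =====
def prediction_generator (instance_ : List Int) (T : Int) : List Int :=
  let n : Int := instance_.length
  let pre_sum : List Int :=
    (PySem.List.pyRange 1 n 1).foldl
      (fun ps i => ps ++ [PySem.List.pyGetD instance_ i 0 + PySem.List.pyGetD ps (i - 1) 0])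
      [PySem.List.pyGetD instance_ 0 0]
  (PySem.List.pyRange 0 n 1).foldl
    (fun pred i =>
      let pred := pred ++ [PySem.List.pyGetD pre_sum (min (i + T - 1) (n - 1)) 0]
      if i > 0 then
        PySem.List.pySetD pred i (PySem.List.pyGetD pred i 0 - PySem.List.pyGetD pre_sum (i - 1) 0)
      else pred)
    []

-- ===== PORT B =====
def prediction_generator_alt (instance_ : List Int) (T : Int) : List Int :=
  let n : Int := instance_.length
  if T ≤ 0 then
    PySem.List.pyRepeat [0] n
  else
    let running : Int := (PySem.List.slice instance_ none (some T)).sum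
    ((PySem.List.pyRange 0 n 1).foldl
      (fun (st : List Int × Int) i =>
        let out := st.1 ++ [st.2]
        if i + 1 < n then
          let r := st.2 - PySem.List.pyGetD instance_ i 0
          let r := if i + T < n then r + PySem.List.pyGetD instance_ (i + T) 0 else r
          (out, r)
        else (out, st.2))
      ([], running)).1

-- ===== PRECONDITION & SPEC =====
-- Pre_ is exactly where the Python A returns normally: A raises IndexError on an empty
-- instance (instance[0]) and when len(instance) + T < 1 (negative pre_sum index below -len).
def Pre_prediction_generator (instance_ : List Int) (T : Int) : Prop :=
  instance_ ≠ [] ∧ 1 ≤ (instance_.length : Int) + T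
instance (instance_ : List Int) (T : Int) : Decidable (Pre_prediction_generator instance_ T) := by
  unfold Pre_prediction_generator; infer_instance
def pvWitness_prediction_generator : List Int × Int := ([3, 1, 4], 2)

-- For T ≤ 0 on inputs in Pre_, A's negative index i+T-1 wraps around pre_sum and returns
-- accidental prefix-sum differences (the total sum at i=0), while B returns 0 everywhere —
-- the sum of an empty window, the intended value for a nonpositive window length.
def D_prediction_generator (instance_ : List Int) (T : Int) : Prop := T ≤ 0
instance (instance_ : List Int) (T : Int) : Decidable (D_prediction_generator instance_ T) := by
  unfold D_prediction_generator; infer_instance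
def Spec_prediction_generator (instance_ : List Int) (T : Int) (out : List Int) : Prop :=
  ¬ D_prediction_generator instance_ T → out = prediction_generator_alt instance_ T
instance (instance_ : List Int) (T : Int) (out : List Int) : Decidable (Spec_prediction_generator instance_ T out) := by
  unfold Spec_prediction_generator; infer_instance
def pvDiffWitness_prediction_generator : List Int × Int := ([1, 2], 0)
def pvDiffWitnessOut_prediction_generator : (List Int) × (List Int) := ([3, 0], [0, 0])

-- ===== CLAIM (what is proved, stated in full; the proofs are below) =====
def Claim_unchanged_prediction_generator : Prop := ∀ (instance_ : List Int) (T : Int), Dom_prediction_generator instance_ T → Pre_prediction_generator instance_ T → Spec_prediction_generator instance_ T (prediction_generator instance_ T)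
def Claim_changed_prediction_generator : Prop := Dom_prediction_generator (pvDiffWitness_prediction_generator.1) (pvDiffWitness_prediction_generator.2) ∧ Pre_prediction_generator (pvDiffWitness_prediction_generator.1) (pvDiffWitness_prediction_generator.2) ∧ D_prediction_generator (pvDiffWitness_prediction_generator.1) (pvDiffWitness_prediction_generator.2) ∧ prediction_generator (pvDiffWitness_prediction_generator.1) (pvDiffWitness_prediction_generator.2) = pvDiffWitnessOut_prediction_generator.1 ∧ prediction_generator_alt (pvDiffWitness_prediction_generator.1) (pvDiffWitness_prediction_generator.2) = pvDiffWitnessOut_prediction_generator.2 ∧ pvDiffWitnessOut_prediction_generator.1 ≠ pvDiffWitnessOut_prediction_generator.2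

-- ===== LEMMAS AND PROOFS =====

-- prefix sum of the first k elements
def psum (xs : List Int) (k : Nat) : Int := (xs.take k).sum

theorem psum_clamp (xs : List Int) (k : Nat) (hk : xs.length ≤ k) :
    psum xs k = psum xs xs.length := by
  simp [psum, List.take_of_length_le hk, List.take_of_length_le (le_refl xs.length)]

theorem presum_eq (instance_ : List Int) (m : Nat) (h1 : 1 ≤ m) (h2 : m ≤ instance_.length) :
    (PySem.List.pyRange 1 (m:Int) 1).foldl
      (fun ps i => ps ++ [PySem.List.pyGetD instance_ i 0 + PySem.List.pyGetD ps (i - 1) 0])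
      [PySem.List.pyGetD instance_ 0 0]
    = (List.range m).map (fun k => psum instance_ (k+1)) := by
  induction m, h1 using Nat.le_induction with
  | base =>
    obtain ⟨x, xs, rfl⟩ : ∃ x xs, instance_ = x :: xs := by
      cases instance_ with
      | nil => simp at h2
      | cons x xs => exact ⟨x, xs, rfl⟩
    simp [PySem.List.pyRange_one_eq_nil (by omega : (1:Int) ≤ 1), List.range_succ, psum]
  | succ m hm ih =>
    have hmn : m ≤ instance_.length := by omega
    have hmlt : m < instance_.length := by omega
    have hsplit : PySem.List.pyRange 1 ((m+1 : Nat) : Int) 1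
        = PySem.List.pyRange 1 (m:Int) 1 ++ [(m:Int)] := by
      push_cast
      exact PySem.List.pyRange_one_succ_right (by exact_mod_cast hm)
    rw [hsplit, List.foldl_append, ih hmn]
    have hc : ((m:Int) - 1) = ((m-1 : Nat) : Int) := by omega
    simp only [List.foldl_cons, List.foldl_nil, hc, PySem.List.pyGetD_natCast]
    rw [PySem.List.getD_map_range _ m (m-1) 0 (by omega)]
    have : instance_.getD m 0 = instance_[m] := by
      simp [List.getD, List.getElem?_eq_getElem hmlt]
    rw [this, List.range_succ, List.map_append]
    have hms : m - 1 + 1 = m := by omega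
    rw [hms]
    simp [add_comm, List.sum_take_succ instance_ m hmlt, psum]

theorem psum_succ' (xs : List Int) (k : Nat) (hk : k < xs.length) :
    psum xs (k + 1) = psum xs k + xs[k] := List.sum_take_succ xs k hk

theorem aouter_eq (instance_ : List Int) (t : Nat) (ht : 1 ≤ t) (hn : 1 ≤ instance_.length)
    (m : Nat) (h2 : m ≤ instance_.length) :
    (PySem.List.pyRange 0 (m:Int) 1).foldl
      (fun pred i =>
        let pred := pred ++ [PySem.List.pyGetD ((List.range instance_.length).map (fun k => psum instance_ (k+1))) (min (i + (t:Int) - 1) ((instance_.length : Int) - 1)) 0]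
        if i > 0 then
          PySem.List.pySetD pred i (PySem.List.pyGetD pred i 0 - PySem.List.pyGetD ((List.range instance_.length).map (fun k => psum instance_ (k+1))) (i - 1) 0)
        else pred)
      []
    = (List.range m).map (fun j => psum instance_ (j+t) - psum instance_ j) := by
  induction m with
  | zero => simp [PySem.List.pyRange_one_eq_nil (by omega : (0:Int) ≤ 0)]
  | succ m ih =>
    have hmlt : m < instance_.length := by omega
    have hsplit : PySem.List.pyRange 0 ((m+1 : Nat) : Int) 1
        = PySem.List.pyRange 0 (m:Int) 1 ++ [(m:Int)] := by
      push_cast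
      exact PySem.List.pyRange_one_succ_right (by exact_mod_cast Nat.zero_le m)
    rw [hsplit, List.foldl_append, ih (by omega)]
    set n := instance_.length with hnn
    -- the appended index
    have hidx : (min ((m:Int) + (t:Int) - 1) ((n:Int) - 1)) = ((min (m+t-1) (n-1) : Nat) : Int) := by
      omega
    set k := min (m+t-1) (n-1) with hk
    have hklt : k < n := by omega
    have hval : psum instance_ (k+1) = psum instance_ (m+t) := by
      rcases Nat.lt_or_ge n (m+t) with h | h
      · have h1 : k + 1 = n := by omega
        rw [h1, psum_clamp instance_ (m+t) (by omega)]
      · have : k + 1 = m + t := by omega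
        rw [this]
    simp only [List.foldl_cons, List.foldl_nil, hidx, PySem.List.pyGetD_natCast]
    rw [List.getD_eq_getElem?_getD, List.getElem?_map,
        List.getElem?_range hklt]
    simp only [Option.map_some, Option.getD_some, hval]
    by_cases hm0 : m = 0
    · subst hm0
      simp [List.range_succ, psum]
    · have hpos : ((m:Int) > 0) := by omega
      rw [if_pos hpos]
      have hc : ((m:Int) - 1) = ((m-1 : Nat) : Int) := by omega
      simp only [hc, PySem.List.pyGetD_natCast, PySem.List.pySetD_natCast]
      have hlen : ((List.range m).map (fun j => psum instance_ (j+t) - psum instance_ j)).length = m := by simp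
      have hget : ((List.range m).map (fun j => psum instance_ (j+t) - psum instance_ j) ++ [psum instance_ (m+t)]).getD m 0 = psum instance_ (m+t) := by
        rw [← hlen]; simp [List.getD]
      have hset : ∀ y : Int, ((List.range m).map (fun j => psum instance_ (j+t) - psum instance_ j) ++ [psum instance_ (m+t)]).set m y
          = (List.range m).map (fun j => psum instance_ (j+t) - psum instance_ j) ++ [y] := by
        intro y; rw [← hlen]; simp
      rw [hget, hset]
      rw [List.getD_eq_getElem?_getD, List.getElem?_map, List.getElem?_range (by omega : m-1 < n)]
      simp only [Option.map_some, Option.getD_some]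
      have hms : m - 1 + 1 = m := by omega
      rw [hms, List.range_succ, List.map_append]
      simp

theorem bfold_eq (instance_ : List Int) (t : Nat) (hn : 1 ≤ instance_.length)
    (m : Nat) (h2 : m ≤ instance_.length) :
    (PySem.List.pyRange 0 (m:Int) 1).foldl
      (fun (st : List Int × Int) i =>
        let out := st.1 ++ [st.2]
        if i + 1 < (instance_.length : Int) then
          let r := st.2 - PySem.List.pyGetD instance_ i 0
          let r := if i + (t:Int) < (instance_.length : Int) then r + PySem.List.pyGetD instance_ (i + (t:Int)) 0 else r
          (out, r)
        else (out, st.2))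
      ([], psum instance_ t)
    = ((List.range m).map (fun j => psum instance_ (j+t) - psum instance_ j),
       psum instance_ (min m (instance_.length - 1) + t) - psum instance_ (min m (instance_.length - 1))) := by
  induction m with
  | zero =>
    simp [PySem.List.pyRange_one_eq_nil (by omega : (0:Int) ≤ 0), psum]
  | succ m ih =>
    have hmlt : m < instance_.length := by omega
    have hmin : min m (instance_.length - 1) = m := by omega
    have hsplit : PySem.List.pyRange 0 ((m+1 : Nat) : Int) 1
        = PySem.List.pyRange 0 (m:Int) 1 ++ [(m:Int)] := by
      push_cast
      exact PySem.List.pyRange_one_succ_right (by exact_mod_cast Nat.zero_le m)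
    rw [hsplit, List.foldl_append, ih (by omega), hmin]
    set n := instance_.length with hnn
    have hout : (List.range m).map (fun j => psum instance_ (j+t) - psum instance_ j) ++ [psum instance_ (m+t) - psum instance_ m]
        = (List.range (m+1)).map (fun j => psum instance_ (j+t) - psum instance_ j) := by
      rw [List.range_succ, List.map_append]; simp
    simp only [List.foldl_cons, List.foldl_nil]
    by_cases hlast : m + 1 < n
    · have hb : ((m:Int) + 1 < (n:Int)) := by omega
      rw [if_pos hb]
      have hmin' : min (m+1) (n-1) = m + 1 := by omega
      have hget : PySem.List.pyGetD instance_ (m:Int) 0 = instance_[m] := by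
        rw [PySem.List.pyGetD_natCast]
        simp [List.getD, List.getElem?_eq_getElem hmlt]
      rw [hmin', hout, hget]
      by_cases htin : m + t < n
      · have hb2 : ((m:Int) + (t:Int) < (n:Int)) := by omega
        rw [if_pos hb2]
        have hcast : ((m:Int) + (t:Int)) = ((m+t : Nat) : Int) := by omega
        have hget2 : PySem.List.pyGetD instance_ ((m:Int) + (t:Int)) 0 = instance_[m+t] := by
          rw [hcast, PySem.List.pyGetD_natCast]
          simp [List.getD, List.getElem?_eq_getElem htin]
        rw [hget2]
        have e1 : psum instance_ (m+1+t) = psum instance_ (m+t) + instance_[m+t] := by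
          have : m + 1 + t = (m+t) + 1 := by omega
          rw [this, psum_succ' instance_ (m+t) htin]
        have e2 : psum instance_ (m+1) = psum instance_ m + instance_[m] := psum_succ' instance_ m hmlt
        rw [e1, e2]; ring_nf
      · have hb2 : ¬ ((m:Int) + (t:Int) < (n:Int)) := by omega
        rw [if_neg hb2]
        have e1 : psum instance_ (m+1+t) = psum instance_ (m+t) := by
          rw [psum_clamp instance_ (m+1+t) (by omega), psum_clamp instance_ (m+t) (by omega)]
        have e2 : psum instance_ (m+1) = psum instance_ m + instance_[m] := psum_succ' instance_ m hmlt
        rw [e1, e2]; ring_nf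
    · have hb : ¬ ((m:Int) + 1 < (n:Int)) := by omega
      rw [if_neg hb]
      have hmin' : min (m+1) (n-1) = m := by omega
      rw [hmin', hout]

theorem main_equiv (instance_ : List Int) (T : Int)
    (hne : instance_ ≠ []) (hT : 1 ≤ T) :
    prediction_generator instance_ T = prediction_generator_alt instance_ T := by
  obtain ⟨t, rfl⟩ : ∃ t : Nat, T = (t:Int) := ⟨T.toNat, (Int.toNat_of_nonneg (by omega)).symm⟩
  have ht : 1 ≤ t := by exact_mod_cast hT
  have hn : 1 ≤ instance_.length := List.length_pos_iff.mpr hne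
  simp only [prediction_generator, prediction_generator_alt]
  rw [if_neg (by omega : ¬ ((t:Int) ≤ 0))]
  rw [presum_eq instance_ instance_.length hn (le_refl _)]
  rw [aouter_eq instance_ t ht hn instance_.length (le_refl _)]
  have hsl : (PySem.List.slice instance_ none (some (t:Int))).sum = psum instance_ t := by
    rw [PySem.List.slice_to_natCast]
    simp [psum]
  rw [hsl, bfold_eq instance_ t hn instance_.length (le_refl _)]

-- ===== VERDICT (by name: the statement is the Claim_ definition above) =====
theorem prediction_generator_spec : Claim_unchanged_prediction_generator := by
  intro instance_ T _ hpre hnd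
  unfold Pre_prediction_generator at hpre
  unfold D_prediction_generator at hnd
  exact main_equiv instance_ T hpre.1 (by omega)

theorem prediction_generator_changed : Claim_changed_prediction_generator := by
  unfold Claim_changed_prediction_generator; decide
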